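-- pv_equiv track=rewrite | github.com/jwillz7667/ShadowScout-AI | assistants/attack_strategist.py | _estimate_attack_time
-- ===== SOURCE A (Python) =====
-- from typing import Dict, Any, List
--
-- def _estimate_attack_time(vectors: List[Dict[str, Any]]) -> int:
--     """Estimate time required for attack in minutes"""
--     total_time = 0
--
--     for vector in vectors:
--         # Base time for each vector type
--         time_estimates = {
--             'brute_force': 120,
--             'sql_injection': 60,
--             'xss': 30,
--             'csrf': 15,
--             'info_disclosure': 10
--         }
--
--         vector_type = vector.get('type', '')
--         total_time += time_estimates.get(vector_type, 20)
--
--     return total_time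
-- ===== SOURCE B (Python) =====
-- from typing import Dict, Any, List
--
-- _TIME_ESTIMATES = {
--     'brute_force': 120,
--     'sql_injection': 60,
--     'xss': 30,
--     'csrf': 15,
--     'info_disclosure': 10
-- }
--
-- def _estimate_attack_time(vectors: List[Dict[str, Any]]) -> int:
--     """Estimate time required for attack in minutes (group-by-type, then weighted sum)."""
--     counts: Dict[str, int] = {}
--     for vector in vectors:
--         t = vector.get('type', '')
--         counts[t] = counts.get(t, 0) + 1
--     return sum(c * _TIME_ESTIMATES.get(t, 20) for t, c in counts.items())
-- ===== Notes on version B (the rewrite author's own statement) =====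
-- stated objective: alternative
-- what changed: B first builds a frequency table of vector types, then computes a weighted sum count*estimate over the distinct types, with the estimate table defined once instead of rebuilt per iteration; A keeps a running per-vector sum.
import Mathlib
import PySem

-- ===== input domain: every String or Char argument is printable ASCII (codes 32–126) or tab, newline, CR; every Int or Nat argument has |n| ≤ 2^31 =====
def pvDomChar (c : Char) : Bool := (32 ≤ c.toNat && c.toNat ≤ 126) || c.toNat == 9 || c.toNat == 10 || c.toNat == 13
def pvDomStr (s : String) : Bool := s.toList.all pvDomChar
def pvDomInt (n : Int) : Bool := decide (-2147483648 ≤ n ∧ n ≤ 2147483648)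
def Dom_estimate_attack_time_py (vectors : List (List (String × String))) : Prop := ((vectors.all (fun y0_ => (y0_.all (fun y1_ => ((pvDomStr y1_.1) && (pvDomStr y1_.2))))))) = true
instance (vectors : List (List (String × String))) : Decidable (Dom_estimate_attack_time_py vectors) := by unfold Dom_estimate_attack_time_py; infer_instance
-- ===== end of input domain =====

-- B groups vectors by type into a frequency table built once, then takes a weighted sum
-- count * estimate over the distinct types (alternative decomposition; equal on all inputs).


-- ===== PORT A =====
-- A: for each vector, rebuild the estimates dict, look up vector.get('type',''), add to total.
def estimate_attack_time_py (vectors : List (List (String × String))) : Int :=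
  vectors.foldl
    (fun total_time vector =>
      let time_estimates : PySem.Dict String Int :=
        PySem.Dict.ofList [("brute_force", 120), ("sql_injection", 60), ("xss", 30),
                           ("csrf", 15), ("info_disclosure", 10)]
      let vector_type := (PySem.Dict.mk vector).getD "type" ""
      total_time + time_estimates.getD vector_type 20)
    0

-- ===== PORT B =====
-- B: the estimates table, defined once.
def timeEstimatesB : PySem.Dict String Int :=
  PySem.Dict.ofList [("brute_force", 120), ("sql_injection", 60), ("xss", 30),
                     ("csrf", 15), ("info_disclosure", 10)]

-- B: count occurrences of each type, then weighted sum over the distinct (type, count) pairs.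
def estimate_attack_time_py_alt (vectors : List (List (String × String))) : Int :=
  let counts : PySem.Dict String Int :=
    vectors.foldl
      (fun d vector => d.modify ((PySem.Dict.mk vector).getD "type" "") 0 (· + 1))
      PySem.Dict.empty
  (counts.items.map (fun p => p.2 * timeEstimatesB.getD p.1 20)).sum

-- ===== PRECONDITION & SPEC =====
def Spec_estimate_attack_time_py (vectors : List (List (String × String))) (out : Int) : Prop := out = estimate_attack_time_py_alt vectors
instance (vectors : List (List (String × String))) (out : Int) : Decidable (Spec_estimate_attack_time_py vectors out) := by unfold Spec_estimate_attack_time_py; infer_instance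

-- ===== CLAIM (what is proved, stated in full; the proofs are below) =====
def Claim_equal_estimate_attack_time_py : Prop := ∀ (vectors : List (List (String × String))), Dom_estimate_attack_time_py vectors → Spec_estimate_attack_time_py vectors (estimate_attack_time_py vectors)

-- ===== LEMMAS AND PROOFS =====

-- grouped weighted sum over the distinct elements equals the plain mapped sum
theorem grouped_sum_eq (l : List String) (f : String → Int) :
    ((PySem.Set.ofList l).map (fun k => (l.count k : Int) * f k)).sum = (l.map f).sum := by
  have h1 : (PySem.Set.ofList l).toFinset = l.toFinset := by
    ext x
    simp [PySem.Set.mem_ofList]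
  calc ((PySem.Set.ofList l).map (fun k => (l.count k : Int) * f k)).sum
      = (PySem.Set.ofList l).toFinset.sum (fun k => (l.count k : Int) * f k) :=
        (List.sum_toFinset _ (PySem.Set.nodup_ofList l)).symm
    _ = ∑ m ∈ l.toFinset, (l.count m : Int) * f m := by rw [h1]
    _ = ∑ m ∈ l.toFinset, l.count m • f m := by simp [nsmul_eq_mul]
    _ = (l.map f).sum := (Finset.sum_list_map_count l f).symm

theorem estimate_attack_time_py_spec : Claim_equal_estimate_attack_time_py := by
  intro vectors _
  show vectors.foldl
      (fun tot v => tot + timeEstimatesB.getD ((PySem.Dict.mk v).getD "type" "") 20) 0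
    = ((vectors.foldl
          (fun d v => d.modify ((PySem.Dict.mk v).getD "type" "") 0 (· + 1))
          PySem.Dict.empty).items.map
        (fun p => p.2 * timeEstimatesB.getD p.1 20)).sum
  rw [PySem.List.foldl_add]
  rw [← List.foldl_map (f := fun v => (PySem.Dict.mk v).getD "type" "")
        (g := fun (d : PySem.Dict String Int) x => d.modify x 0 (· + 1))]
  rw [← PySem.Dict.counter_eq_foldl, PySem.Dict.items_counter, List.map_map]
  simp only [Function.comp_def]
  rw [grouped_sum_eq (vectors.map (fun v => (PySem.Dict.mk v).getD "type" ""))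
        (fun t => timeEstimatesB.getD t 20)]
  rw [List.map_map]
  simp [Function.comp_def]
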